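-- pv_equiv track=rewrite | github.com/DenisTrputec/DynamicStability3 | element_info.py | return_info
-- ===== SOURCE A (Python) =====
-- def return_info(user_options, array):
--     info = []
--     for i in range(0, len(array)):
--         temp_array = []
--         for j in range(0, len(user_options)):
--             if user_options[j]:
--                 temp_array.append(array[i][j])
--         info.append(temp_array)
--     return info
-- ===== SOURCE B (Python) =====
-- def return_info(user_options, array):
--     out = [[] for _ in array]
--     for j, v in enumerate(user_options):
--         if v:
--             out = [acc + [row[j]] for acc, row in zip(out, array)]
--     return out
-- ===== Notes on version B (the rewrite author's own statement) =====
-- stated objective: alternative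
-- what changed: B builds the result column-major: a single pass over the flags, and for each truthy flag it rebuilds all partial output rows by appending that column's value (zip of accumulator with the array), instead of A's row-major outer loop that re-tests every flag per row with an inner accumulator.
import Mathlib
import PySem

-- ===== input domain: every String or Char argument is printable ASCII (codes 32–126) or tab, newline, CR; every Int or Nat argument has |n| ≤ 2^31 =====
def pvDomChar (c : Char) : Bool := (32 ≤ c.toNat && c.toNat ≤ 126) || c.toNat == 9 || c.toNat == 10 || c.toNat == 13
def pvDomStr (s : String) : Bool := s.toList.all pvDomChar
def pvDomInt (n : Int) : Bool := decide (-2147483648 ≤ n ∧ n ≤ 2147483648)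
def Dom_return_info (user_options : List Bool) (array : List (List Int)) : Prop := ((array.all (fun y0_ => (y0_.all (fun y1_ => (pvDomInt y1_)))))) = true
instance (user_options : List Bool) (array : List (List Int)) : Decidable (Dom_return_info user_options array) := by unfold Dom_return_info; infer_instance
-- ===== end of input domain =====

-- B builds the result column-major (one pass over the flags, appending each selected
-- column's value to all partial output rows) instead of A's row-major nested pass.

-- ===== PORT A =====
def return_info (user_options : List Bool) (array : List (List Int)) : List (List Int) :=
  (PySem.List.pyRange 0 array.length 1).foldl (fun info i =>
    info ++ [(PySem.List.pyRange 0 user_options.length 1).foldl (fun temp j =>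
      if PySem.List.pyGetD user_options j false then
        temp ++ [PySem.List.pyGetD (PySem.List.pyGetD array i []) j 0]
      else temp) []]) []

-- ===== PORT B =====
def return_info_alt (user_options : List Bool) (array : List (List Int)) : List (List Int) :=
  (PySem.List.enumerate user_options).foldl (fun out p =>
    if p.2 then
      (out.zip array).map (fun q => q.1 ++ [PySem.List.pyGetD q.2 p.1 0])
    else out)
    (array.map (fun _ => []))

-- ===== PRECONDITION & SPEC =====
-- A raises IndexError when some truthy-flagged column index is out of range for a row;
-- Pre_ excludes exactly those inputs (B raises there too).
def Pre_return_info (user_options : List Bool) (array : List (List Int)) : Prop :=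
  ∀ row ∈ array, ∀ j, j < user_options.length → user_options.getD j false = true → j < row.length
instance (user_options : List Bool) (array : List (List Int)) : Decidable (Pre_return_info user_options array) := by
  unfold Pre_return_info; infer_instance

def pvWitness_return_info : List Bool × List (List Int) := ([true, false], [[1, 2], [3, 4]])

def Spec_return_info (user_options : List Bool) (array : List (List Int)) (out : List (List Int)) : Prop := out = return_info_alt user_options array
instance (user_options : List Bool) (array : List (List Int)) (out : List (List Int)) : Decidable (Spec_return_info user_options array out) := by unfold Spec_return_info; infer_instance

-- ===== CLAIM (what is proved, stated in full; the proofs are below) =====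
def Claim_equal_return_info : Prop := ∀ (user_options : List Bool) (array : List (List Int)), Dom_return_info user_options array → Pre_return_info user_options array → Spec_return_info user_options array (return_info user_options array)

-- ===== LEMMAS AND PROOFS =====

-- skipping flagged-false pairs = folding over the filtered index list
theorem foldl_enum_if (arr : List (List Int)) (l : List (Int × Bool)) :
    ∀ (init : List (List Int)),
      l.foldl (fun out p => if p.2 then
          (out.zip arr).map (fun q => q.1 ++ [PySem.List.pyGetD q.2 p.1 0]) else out) init
        = ((l.filter (fun p => p.2)).map (fun p => p.1)).foldl
            (fun out j => (out.zip arr).map (fun q => q.1 ++ [PySem.List.pyGetD q.2 j 0])) init := by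
  induction l with
  | nil => intro init; rfl
  | cons p t ih =>
      intro init
      by_cases h : p.2 = true <;> simp [h, ih]

-- one column step: appending column j to every partial row, pointwise over array
theorem col_step (arr : List (List Int)) (h : List Int → List Int) (j : Int) :
    ((arr.map h).zip arr).map (fun q => q.1 ++ [PySem.List.pyGetD q.2 j 0])
      = arr.map (fun r => h r ++ [PySem.List.pyGetD r j 0]) := by
  induction arr with
  | nil => rfl
  | cons a t ih => simp [ih]

-- the whole column-major fold, with a generalized per-row prefix h
theorem foldl_cols (arr : List (List Int)) (cols : List Int) :
    ∀ (h : List Int → List Int),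
      cols.foldl (fun out j => (out.zip arr).map (fun q => q.1 ++ [PySem.List.pyGetD q.2 j 0]))
          (arr.map h)
        = arr.map (fun r => h r ++ cols.map (fun j => PySem.List.pyGetD r j 0)) := by
  induction cols with
  | nil => intro h; simp
  | cons j t ih =>
      intro h
      simp only [List.foldl_cons, col_step arr h j, ih (fun r => h r ++ [PySem.List.pyGetD r j 0])]
      simp

-- B's column-index table, as a filter over the same pyRange A iterates
theorem cols_eq (uo : List Bool) :
    ((PySem.List.enumerate uo).filter (fun p => p.2)).map (fun p => p.1)
      = (PySem.List.pyRange 0 uo.length 1).filter (fun j => PySem.List.pyGetD uo j false) := by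
  rw [PySem.List.enumerate_eq_map_pyRange uo false]
  simp only [PySem.List.len_eq, List.filter_map, List.map_map, Function.comp_def]
  simp

-- A's inner loop equals projecting one row through the column table
theorem inner_eq (uo : List Bool) (row : List Int) :
    (PySem.List.pyRange 0 uo.length 1).foldl (fun temp j =>
        if PySem.List.pyGetD uo j false then temp ++ [PySem.List.pyGetD row j 0] else temp) []
      = (((PySem.List.enumerate uo).filter (fun p => p.2)).map (fun p => p.1)).map
          (fun j => PySem.List.pyGetD row j 0) := by
  rw [cols_eq, PySem.List.foldl_append_if (fun j => PySem.List.pyGetD uo j false) (fun j => PySem.List.pyGetD row j 0)]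
  simp

-- ===== VERDICT (by name: the statement is the Claim_ definition above) =====
theorem return_info_spec : Claim_equal_return_info := by
  intro uo arr _ _
  unfold Spec_return_info return_info return_info_alt
  have hA := PySem.List.foldl_pyRange_zero_pyGetD' arr []
    (fun info row => info ++ [(PySem.List.pyRange 0 uo.length 1).foldl (fun temp j =>
      if PySem.List.pyGetD uo j false then temp ++ [PySem.List.pyGetD row j 0] else temp) []]) []
  simp only at hA
  rw [hA, PySem.List.foldl_append_singleton_eq_map]
  rw [foldl_enum_if arr]
  rw [foldl_cols arr _ (fun _ => [])]
  simp only [inner_eq]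
  simp
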